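-- pv_equiv track=rewrite | github.com/MrBrantCode/unitest_baseline | mut_generate/mist_train_taco/taco_2847/solution.py | calculate_required_colors
-- ===== SOURCE A (Python) =====
-- def calculate_required_colors(s: str) -> list:
--     # Initialize a list to count the required colors
--     required_counts = [0, 0, 0, 0]
--
--     # Iterate over the string in chunks of 4
--     for i in range(0, len(s), 4):
--         sub = s[i:i + 4]
--         if 'R' not in sub:
--             required_counts[0] += 1
--         if 'G' not in sub:
--             required_counts[1] += 1
--         if 'B' not in sub:
--             required_counts[2] += 1
--         if 'Y' not in sub:
--             required_counts[3] += 1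
--
--     return required_counts
-- ===== SOURCE B (Python) =====
-- def calculate_required_colors(s: str) -> list:
--     # Single pass over the characters, tracking which colors appear in the
--     # current 4-char chunk with four booleans; flush at each chunk boundary.
--     counts = [0, 0, 0, 0]
--     r = g = b = y = False
--     n = 0
--     for ch in s:
--         if ch == 'R':
--             r = True
--         elif ch == 'G':
--             g = True
--         elif ch == 'B':
--             b = True
--         elif ch == 'Y':
--             y = True
--         n += 1
--         if n % 4 == 0:
--             if not r:
--                 counts[0] += 1
--             if not g:
--                 counts[1] += 1
--             if not b:
--                 counts[2] += 1
--             if not y: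
--                 counts[3] += 1
--             r = g = b = y = False
--     if n % 4 != 0:
--         if not r:
--             counts[0] += 1
--         if not g:
--             counts[1] += 1
--         if not b:
--             counts[2] += 1
--         if not y:
--             counts[3] += 1
--     return counts
-- ===== Notes on version B (the rewrite author's own statement) =====
-- stated objective: alternative
-- what changed: Replaces the slice-per-chunk loop (build s[i:i+4] and run four membership scans over it) with a single character stream that maintains four presence booleans and flushes the counters at every 4-char boundary and once at the end, so no substrings are built.
import Mathlib
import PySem

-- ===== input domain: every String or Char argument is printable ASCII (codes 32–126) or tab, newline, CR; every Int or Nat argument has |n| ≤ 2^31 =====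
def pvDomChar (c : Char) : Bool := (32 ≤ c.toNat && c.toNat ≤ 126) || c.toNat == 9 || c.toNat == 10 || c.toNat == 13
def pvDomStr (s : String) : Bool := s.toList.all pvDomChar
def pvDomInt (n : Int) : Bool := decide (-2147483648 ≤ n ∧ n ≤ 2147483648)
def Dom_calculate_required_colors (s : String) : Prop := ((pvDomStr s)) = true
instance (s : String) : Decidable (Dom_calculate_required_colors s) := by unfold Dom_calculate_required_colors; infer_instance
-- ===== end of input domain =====

-- B streams the characters with four per-chunk presence booleans instead of slicing
-- 4-char substrings; same return value, alternative decomposition.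

-- ===== PORT A =====
-- A's 'for i in range(0, len(s), 4)' loop, as recursion on the index i (step 4).
def pvALoop (cs : List Char) (i : Nat) (rc : List Int) : List Int :=
  if _h : i < cs.length then
    let sub := PySem.List.slice cs (some (i : Int)) (some ((i : Int) + 4))
    let rc := if 'R' ∉ sub then rc.set 0 (rc.getD 0 0 + 1) else rc
    let rc := if 'G' ∉ sub then rc.set 1 (rc.getD 1 0 + 1) else rc
    let rc := if 'B' ∉ sub then rc.set 2 (rc.getD 2 0 + 1) else rc
    let rc := if 'Y' ∉ sub then rc.set 3 (rc.getD 3 0 + 1) else rc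
    pvALoop cs (i + 4) rc
  else rc
termination_by cs.length - i

def calculate_required_colors (s : String) : List Int :=
  pvALoop s.toList 0 [0, 0, 0, 0]

-- ===== PORT B =====
-- The if/elif chain setting the presence booleans for one character.
def pvBStep (ch : Char) (fl : Bool × Bool × Bool × Bool) : Bool × Bool × Bool × Bool :=
  if ch = 'R' then (true, fl.2.1, fl.2.2.1, fl.2.2.2)
  else if ch = 'G' then (fl.1, true, fl.2.2.1, fl.2.2.2)
  else if ch = 'B' then (fl.1, fl.2.1, true, fl.2.2.2)
  else if ch = 'Y' then (fl.1, fl.2.1, fl.2.2.1, true)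
  else fl

-- B's 'for ch in s' loop; counters, presence flags, running position n.
def pvBLoop : List Char → (Int × Int × Int × Int) → (Bool × Bool × Bool × Bool) → Int → List Int
  | [], (cr, cg, cb, cy), (r, g, b, y), n =>
    if n % 4 ≠ 0 then
      [cr + (if r then 0 else 1), cg + (if g then 0 else 1),
       cb + (if b then 0 else 1), cy + (if y then 0 else 1)]
    else [cr, cg, cb, cy]
  | ch :: rest, (cr, cg, cb, cy), fl, n =>
    let fl := pvBStep ch fl
    let n := n + 1
    if n % 4 = 0 then
      pvBLoop rest
        (cr + (if fl.1 then 0 else 1), cg + (if fl.2.1 then 0 else 1),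
         cb + (if fl.2.2.1 then 0 else 1), cy + (if fl.2.2.2 then 0 else 1))
        (false, false, false, false) n
    else
      pvBLoop rest (cr, cg, cb, cy) fl n

def calculate_required_colors_alt (s : String) : List Int :=
  pvBLoop s.toList (0, 0, 0, 0) (false, false, false, false) 0

-- ===== PRECONDITION & SPEC =====
def Spec_calculate_required_colors (s : String) (out : List Int) : Prop := out = calculate_required_colors_alt s
instance (s : String) (out : List Int) : Decidable (Spec_calculate_required_colors s out) := by unfold Spec_calculate_required_colors; infer_instance

-- ===== CLAIM (what is proved, stated in full; the proofs are below) =====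
def Claim_equal_calculate_required_colors : Prop := ∀ (s : String), Dom_calculate_required_colors s → Spec_calculate_required_colors s (calculate_required_colors s)

-- ===== LEMMAS AND PROOFS =====
theorem pvBStep_eq (ch : Char) (r g b y : Bool) :
    pvBStep ch (r, g, b, y) =
      (r || (ch = 'R'), g || (ch = 'G'), b || (ch = 'B'), y || (ch = 'Y')) := by
  unfold pvBStep
  split_ifs <;> simp_all

theorem pvALoop_stop (cs : List Char) (i : Nat) (hi : ¬ i < cs.length) (rc : List Int) :
    pvALoop cs i rc = rc := by
  rw [pvALoop, dif_neg hi]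

theorem pvALoop_step (cs : List Char) (i : Nat) (hi : i < cs.length) (a b c d : Int) :
    pvALoop cs i [a, b, c, d] = pvALoop cs (i + 4)
      [if 'R' ∈ (cs.drop i).take 4 then a else a + 1,
       if 'G' ∈ (cs.drop i).take 4 then b else b + 1,
       if 'B' ∈ (cs.drop i).take 4 then c else c + 1,
       if 'Y' ∈ (cs.drop i).take 4 then d else d + 1] := by
  have hslice : PySem.List.slice cs (some (i : Int)) (some ((i : Int) + 4)) = (cs.drop i).take 4 := by
    have := PySem.List.slice_natCast_add cs i 4
    simpa using this
  rw [pvALoop, dif_pos hi]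
  simp only [hslice]
  split_ifs <;> rfl

theorem pvBLoop_nil (cr cg cb cy : Int) (r g b y : Bool) (n : Int) :
    pvBLoop [] (cr, cg, cb, cy) (r, g, b, y) n =
      if n % 4 ≠ 0 then
        [cr + (if r then 0 else 1), cg + (if g then 0 else 1),
         cb + (if b then 0 else 1), cy + (if y then 0 else 1)]
      else [cr, cg, cb, cy] := rfl

theorem pvBLoop_cons (ch : Char) (rest : List Char) (cr cg cb cy : Int) (r g b y : Bool) (n : Int) :
    pvBLoop (ch :: rest) (cr, cg, cb, cy) (r, g, b, y) n =
      if (n + 1) % 4 = 0 then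
        pvBLoop rest
          (cr + (if r || (ch = 'R') then 0 else 1), cg + (if g || (ch = 'G') then 0 else 1),
           cb + (if b || (ch = 'B') then 0 else 1), cy + (if y || (ch = 'Y') then 0 else 1))
          (false, false, false, false) (n + 1)
      else
        pvBLoop rest (cr, cg, cb, cy)
          (r || (ch = 'R'), g || (ch = 'G'), b || (ch = 'B'), y || (ch = 'Y')) (n + 1) := by
  rw [pvBLoop]
  simp only [pvBStep_eq]

theorem pv_addite (c : Prop) [Decidable c] (a : Int) :
    a + (if c then (0 : Int) else 1) = if c then a else a + 1 := by
  split_ifs <;> simp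

theorem pv_flag1 (x c1 : Char) :
    ((false || decide (c1 = x)) = true) ↔ x ∈ [c1] := by
  simp only [Bool.false_or, decide_eq_true_eq, List.mem_cons, List.not_mem_nil, or_false]
  aesop

theorem pv_flag2 (x c1 c2 : Char) :
    ((false || decide (c1 = x) || decide (c2 = x)) = true) ↔ x ∈ [c1, c2] := by
  simp only [Bool.false_or, Bool.or_eq_true, decide_eq_true_eq, List.mem_cons, List.not_mem_nil, or_false]
  aesop

theorem pv_flag3 (x c1 c2 c3 : Char) :
    ((false || decide (c1 = x) || decide (c2 = x) || decide (c3 = x)) = true) ↔ x ∈ [c1, c2, c3] := by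
  simp only [Bool.false_or, Bool.or_eq_true, decide_eq_true_eq, List.mem_cons, List.not_mem_nil, or_false]
  aesop

theorem pv_flag4 (x c1 c2 c3 c4 : Char) :
    ((false || decide (c1 = x) || decide (c2 = x) || decide (c3 = x) || decide (c4 = x)) = true) ↔
      x ∈ [c1, c2, c3, c4] := by
  simp only [Bool.false_or, Bool.or_eq_true, decide_eq_true_eq, List.mem_cons, List.not_mem_nil, or_false]
  aesop

theorem pv_main (cs : List Char) (k i : Nat) (hk : cs.length - i ≤ k)
    (a b c d : Int) (n : Int) (hn : n % 4 = 0) :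
    pvALoop cs i [a, b, c, d] = pvBLoop (cs.drop i) (a, b, c, d) (false, false, false, false) n := by
  induction k generalizing i a b c d n with
  | zero =>
    have hge : cs.length ≤ i := by omega
    rw [pvALoop_stop cs i (by omega), List.drop_eq_nil_of_le hge, pvBLoop_nil, if_neg (by omega)]
  | succ k ih =>
    by_cases hi : i < cs.length
    · have hlen : (cs.drop i).length = cs.length - i := List.length_drop ..
      rw [pvALoop_step cs i hi]
      rcases ht : cs.drop i with _ | ⟨c1, t1⟩
      · exfalso; rw [ht] at hlen; simp at hlen; omega
      rcases t1 with _ | ⟨c2, t2⟩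
      · have hlast : cs.length - i = 1 := by rw [ht] at hlen; simpa using hlen.symm
        have htake : List.take 4 [c1] = [c1] := rfl
        rw [pvALoop_stop cs (i + 4) (by omega),
            pvBLoop_cons, if_neg (show ¬((n + 1) % 4 = 0) by omega),
            pvBLoop_nil, if_pos (show (n + 1) % 4 ≠ 0 by omega)]
        simp only [htake, pv_flag1, pv_addite]
      rcases t2 with _ | ⟨c3, t3⟩
      · have hlast : cs.length - i = 2 := by rw [ht] at hlen; simpa using hlen.symm
        have htake : List.take 4 [c1, c2] = [c1, c2] := rfl
        rw [pvALoop_stop cs (i + 4) (by omega),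
            pvBLoop_cons, if_neg (show ¬((n + 1) % 4 = 0) by omega),
            pvBLoop_cons, if_neg (show ¬((n + 1 + 1) % 4 = 0) by omega),
            pvBLoop_nil, if_pos (show (n + 1 + 1) % 4 ≠ 0 by omega)]
        simp only [htake, pv_flag2, pv_addite]
      rcases t3 with _ | ⟨c4, t4⟩
      · have hlast : cs.length - i = 3 := by rw [ht] at hlen; simpa using hlen.symm
        have htake : List.take 4 [c1, c2, c3] = [c1, c2, c3] := rfl
        rw [pvALoop_stop cs (i + 4) (by omega),
            pvBLoop_cons, if_neg (show ¬((n + 1) % 4 = 0) by omega),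
            pvBLoop_cons, if_neg (show ¬((n + 1 + 1) % 4 = 0) by omega),
            pvBLoop_cons, if_neg (show ¬((n + 1 + 1 + 1) % 4 = 0) by omega),
            pvBLoop_nil, if_pos (show (n + 1 + 1 + 1) % 4 ≠ 0 by omega)]
        simp only [htake, pv_flag3, pv_addite]
      · have hrest : cs.length - (i + 4) ≤ k := by
          rw [ht] at hlen; simp at hlen; omega
        have hdrop : cs.drop (i + 4) = t4 := by
          have h44 : cs.drop (i + 4) = (cs.drop i).drop 4 := by rw [List.drop_drop]
          rw [h44, ht]
          rfl
        have htake : List.take 4 (c1 :: c2 :: c3 :: c4 :: t4) = [c1, c2, c3, c4] := rfl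
        rw [pvBLoop_cons, if_neg (show ¬((n + 1) % 4 = 0) by omega),
            pvBLoop_cons, if_neg (show ¬((n + 1 + 1) % 4 = 0) by omega),
            pvBLoop_cons, if_neg (show ¬((n + 1 + 1 + 1) % 4 = 0) by omega),
            pvBLoop_cons, if_pos (show (n + 1 + 1 + 1 + 1) % 4 = 0 by omega)]
        have hrec := ih (i + 4) hrest
          (a + (if (false || decide (c1 = 'R') || decide (c2 = 'R') || decide (c3 = 'R') || decide (c4 = 'R')) = true then 0 else 1))
          (b + (if (false || decide (c1 = 'G') || decide (c2 = 'G') || decide (c3 = 'G') || decide (c4 = 'G')) = true then 0 else 1))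
          (c + (if (false || decide (c1 = 'B') || decide (c2 = 'B') || decide (c3 = 'B') || decide (c4 = 'B')) = true then 0 else 1))
          (d + (if (false || decide (c1 = 'Y') || decide (c2 = 'Y') || decide (c3 = 'Y') || decide (c4 = 'Y')) = true then 0 else 1))
          (n + 1 + 1 + 1 + 1) (by omega)
        rw [hdrop] at hrec
        rw [← hrec]
        simp only [htake, pv_flag4, pv_addite]
    · have hge : cs.length ≤ i := by omega
      rw [pvALoop_stop cs i hi, List.drop_eq_nil_of_le hge, pvBLoop_nil, if_neg (by omega)]

-- ===== VERDICT (by name: the statement is the Claim_ definition above) =====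
theorem calculate_required_colors_spec : Claim_equal_calculate_required_colors := by
  intro s _
  unfold Spec_calculate_required_colors calculate_required_colors calculate_required_colors_alt
  simpa using pv_main s.toList s.toList.length 0 (by omega) 0 0 0 0 0 (by decide)
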